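-- pv_equiv track=rewrite | github.com/yoshiinet/dcase2021_task2_ar_frame_seq_model | _03_collect_results.py | target_dirs
-- ===== SOURCE A (Python) =====
-- def target_dirs(csv_files):
--     """
--     return target_dir, selected_files
--     target_dir: eg. 'source_test', 'target_test'
--     """
--     selected_files = []
--     prev_dir_name = None
--     for x in csv_files:
--         basename = x[1] # get base
--         target_dir = '_'.join(basename.split('_')[5:7]) # target_dir
--         if target_dir != prev_dir_name:
--             if selected_files:
--                 yield prev_dir_name, selected_files
--                 selected_files = []
--         selected_files += [x]
--         prev_dir_name = target_dir
--
--     if selected_files: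
--         yield prev_dir_name, selected_files
-- ===== SOURCE B (Python) =====
-- def target_dirs(csv_files):
--     # Build the grouping back-to-front: walk the files in reverse and merge each
--     # file into the head group of the result when its directory key matches.
--     groups = []
--     for x in reversed(csv_files):
--         k = '_'.join(x[1].split('_')[5:7])
--         if groups and groups[0][0] == k:
--             groups[0] = (k, [x] + groups[0][1])
--         else:
--             groups.insert(0, (k, [x]))
--     yield from groups
-- ===== Notes on version B (the rewrite author's own statement) =====
-- stated objective: alternative
-- what changed: B builds the grouping back-to-front with a right fold that merges each file into the head group when the directory key matches, replacing A's forward prev_dir_name/accumulator state machine.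
import Mathlib
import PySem

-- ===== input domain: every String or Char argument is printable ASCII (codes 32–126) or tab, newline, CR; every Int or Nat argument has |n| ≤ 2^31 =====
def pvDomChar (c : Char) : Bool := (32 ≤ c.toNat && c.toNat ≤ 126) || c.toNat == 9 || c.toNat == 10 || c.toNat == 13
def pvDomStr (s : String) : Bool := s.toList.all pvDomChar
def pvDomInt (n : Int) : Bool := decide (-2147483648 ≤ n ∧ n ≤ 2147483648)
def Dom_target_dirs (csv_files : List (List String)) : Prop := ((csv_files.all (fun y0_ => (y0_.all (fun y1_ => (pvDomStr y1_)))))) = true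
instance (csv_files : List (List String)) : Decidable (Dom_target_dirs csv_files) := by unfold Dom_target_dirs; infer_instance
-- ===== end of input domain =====

-- B builds the grouping back-to-front (right fold merging into the head group) instead of
-- A's forward prev_dir_name/accumulator state machine; objective: alternative.

-- ===== PORT A =====
-- shared key: '_'.join(x[1].split('_')[5:7]); the `.getD ""` default is only reached
-- when x[1] would raise IndexError in Python, which Pre_target_dirs excludes.
def pvKey (x : List String) : String :=
  PySem.Str.join "_" (PySem.List.slice ((PySem.Str.split? ((PySem.List.pyGet? x 1).getD "") "_").getD []) (some 5) (some 7))

-- one iteration of A's for-loop over the state (selected_files, prev_dir_name, yielded output)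
def pvStepA (s : List (List String) × Option String × List (String × List (List String)))
    (x : List String) : List (List String) × Option String × List (String × List (List String)) :=
  let td := pvKey x
  let (sel, out) :=
    if some td ≠ s.2.1 then
      (if s.1 ≠ [] then ([], s.2.2 ++ [(s.2.1.getD "", s.1)]) else (s.1, s.2.2))
    else (s.1, s.2.2)
  (sel ++ [x], some td, out)

-- the trailing `if selected_files: yield …`
def pvFinishA (s : List (List String) × Option String × List (String × List (List String))) :
    List (String × List (List String)) :=
  if s.1 ≠ [] then s.2.2 ++ [(s.2.1.getD "", s.1)] else s.2.2

def target_dirs (csv_files : List (List String)) : List (String × List (List String)) :=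
  pvFinishA (csv_files.foldl pvStepA ([], none, []))

-- ===== PORT B =====
-- the body of B's reversed-order loop: merge x into the head group of `groups`
-- when the key matches, otherwise prepend a fresh group
def pvStepB (x : List String) (groups : List (String × List (List String))) :
    List (String × List (List String)) :=
  let k := pvKey x
  match groups with
  | (k', g) :: rest => if k' == k then (k, x :: g) :: rest else (k, [x]) :: (k', g) :: rest
  | [] => [(k, [x])]

-- `for x in reversed(csv_files)` building `groups` back-to-front = a right fold
def target_dirs_alt (csv_files : List (List String)) : List (String × List (List String)) :=
  csv_files.foldr pvStepB []

-- ===== PRECONDITION & SPEC =====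
-- Pre_ excludes lists containing an entry with fewer than two components, on which
-- Python's x[1] raises IndexError (in both A and B).
def Pre_target_dirs (csv_files : List (List String)) : Prop :=
  ∀ x ∈ csv_files, 2 ≤ x.length
instance (csv_files : List (List String)) : Decidable (Pre_target_dirs csv_files) := by
  unfold Pre_target_dirs; infer_instance

def pvWitness_target_dirs : List (List String) :=
  [["d", "sec_1_a_b_c_source_test_x.csv"], ["d", "sec_1_a_b_c_source_test_y.csv"],
   ["d", "sec_1_a_b_c_target_test_x.csv"]]

def Spec_target_dirs (csv_files : List (List String)) (out : List (String × List (List String))) : Prop := out = target_dirs_alt csv_files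
instance (csv_files : List (List String)) (out : List (String × List (List String))) : Decidable (Spec_target_dirs csv_files out) := by unfold Spec_target_dirs; infer_instance

-- ===== CLAIM (what is proved, stated in full; the proofs are below) =====
def Claim_equal_target_dirs : Prop := ∀ (csv_files : List (List String)), Dom_target_dirs csv_files → Pre_target_dirs csv_files → Spec_target_dirs csv_files (target_dirs csv_files)

-- ===== LEMMAS AND PROOFS =====

-- proof-only middle form: grouping by maximal runs of equal key (takeWhile/dropWhile)
def pvGrp : List (List String) → List (String × List (List String))
  | [] => []
  | x :: xs =>
    let k := pvKey x
    (k, x :: xs.takeWhile (fun y => pvKey y == k)) ::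
      pvGrp (xs.dropWhile (fun y => pvKey y == k))
termination_by l => l.length
decreasing_by
  simpa using Nat.lt_succ_of_le (List.Sublist.length_le (List.dropWhile_sublist _))

-- running A's loop from a nonempty group `sel` whose pending key is `k` produces exactly
-- the run-grouping's next group followed by the run-grouping of the rest
lemma pvFoldA_run (l : List (List String)) :
    ∀ (sel : List (List String)) (k : String) (out : List (String × List (List String))),
      sel ≠ [] →
      pvFinishA (l.foldl pvStepA (sel, some k, out)) =
        out ++ (k, sel ++ l.takeWhile (fun y => pvKey y == k)) ::
          pvGrp (l.dropWhile (fun y => pvKey y == k)) := by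
  induction l with
  | nil =>
    intro sel k out hsel
    simp [pvFinishA, hsel, pvGrp]
  | cons x xs ih =>
    intro sel k out hsel
    by_cases h : pvKey x = k
    · have hstep : pvStepA (sel, some k, out) x = (sel ++ [x], some k, out) := by
        simp [pvStepA, h]
      rw [List.foldl_cons, hstep, ih (sel ++ [x]) k out (by simp)]
      simp [h]
    · have hstep : pvStepA (sel, some k, out) x =
          ([x], some (pvKey x), out ++ [(k, sel)]) := by
        simp [pvStepA, h, hsel]
      rw [List.foldl_cons, hstep, ih [x] (pvKey x) (out ++ [(k, sel)]) (by simp)]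
      simp [h, pvGrp]

-- A equals the run-grouping
lemma pvA_eq_grp (csv_files : List (List String)) : target_dirs csv_files = pvGrp csv_files := by
  unfold target_dirs
  cases csv_files with
  | nil => simp [pvFinishA, pvGrp]
  | cons x xs =>
    have hstep : pvStepA ([], none, []) x = ([x], some (pvKey x), []) := by
      simp [pvStepA]
    rw [List.foldl_cons, hstep, pvFoldA_run xs [x] (pvKey x) [] (by simp)]
    simp [pvGrp]

-- B's back-to-front merge equals the run-grouping
lemma pvAlt_eq_grp (csv_files : List (List String)) :
    target_dirs_alt csv_files = pvGrp csv_files := by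
  unfold target_dirs_alt
  induction csv_files with
  | nil => simp [pvGrp]
  | cons x xs ih =>
    rw [List.foldr_cons, ih]
    cases xs with
    | nil => simp [pvGrp, pvStepB]
    | cons y ys =>
      by_cases h : pvKey y = pvKey x
      · rw [pvGrp, pvGrp]
        simp [pvStepB, h]
      · rw [pvGrp, pvGrp]
        have h' : ¬ pvKey x = pvKey y := fun hc => h hc.symm
        simp [pvStepB, h, h']
        rw [pvGrp]

-- ===== VERDICT (by name: the statement is the Claim_ definition above) =====
theorem target_dirs_spec : Claim_equal_target_dirs := by
  intro csv_files _ _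
  unfold Spec_target_dirs
  rw [pvA_eq_grp, pvAlt_eq_grp]
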